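-- pv_equiv track=rewrite | github.com/demisto/content | Packs/ApiModules/Scripts/CoreIRApiModule/CoreIRApiModule.py | form_powershell_command
-- ===== SOURCE A (Python) =====
-- def form_powershell_command(unescaped_string: str) -> str:
--     """
--     Builds a Powershell command using prefix and a shell-escaped string.
--
--     Args:
--         unescaped_string (str): An unescaped command string.
--
--     Returns:
--         str: Prefixed and escaped command.
--     """
--     escaped_string = ''
--
--     for i, char in enumerate(unescaped_string):
--         if char == "'":
--             escaped_string += "''"
--
--         elif char == '"':
--             backslash_count = 0
--             for j in range(i - 1, -1, -1):
--                 if unescaped_string[j] != '\\':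
--                     break
--                 backslash_count += 1
--
--             escaped_string += ('\\' * backslash_count) + '\\"'
--
--         else:
--             escaped_string += char
--
--     return f"powershell -Command \"{escaped_string}\""
-- ===== SOURCE B (Python) =====
-- def form_powershell_command(unescaped_string: str) -> str:
--     """One-pass state machine: tracks the current trailing backslash run
--     instead of rescanning backwards at every double-quote."""
--     out = []
--     run = 0  # length of the backslash run ending at the current position
--     for char in unescaped_string:
--         if char == "'":
--             out.append("''")
--             run = 0
--         elif char == '"':
--             out.append('\\' * (run + 1) + '"')
--             run = 0
--         elif char == '\\':
--             out.append(char)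
--             run += 1
--         else:
--             out.append(char)
--             run = 0
--     return 'powershell -Command "%s"' % ''.join(out)
-- ===== Notes on version B (the rewrite author's own statement) =====
-- stated objective: alternative
-- what changed: Replaces A's per-quote backward rescan (inner loop counting the backslashes preceding every '"') with a single forward pass that maintains the length of the current trailing backslash run as loop state.
import Mathlib
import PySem

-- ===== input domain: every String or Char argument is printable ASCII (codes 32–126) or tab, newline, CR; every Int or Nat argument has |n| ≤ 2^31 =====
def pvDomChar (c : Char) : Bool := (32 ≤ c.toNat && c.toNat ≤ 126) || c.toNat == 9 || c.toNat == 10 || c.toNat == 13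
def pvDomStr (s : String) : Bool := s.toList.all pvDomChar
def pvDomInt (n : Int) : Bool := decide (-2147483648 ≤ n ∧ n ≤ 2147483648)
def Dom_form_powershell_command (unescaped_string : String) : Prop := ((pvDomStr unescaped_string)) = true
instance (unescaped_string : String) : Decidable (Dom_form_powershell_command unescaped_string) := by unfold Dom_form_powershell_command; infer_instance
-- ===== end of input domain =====

-- B replaces A's backward rescan at every '"' by a one-pass run-length state machine.

-- ===== PORT A =====
-- inner loop `for j in range(i-1,-1,-1): …` of A: count consecutive '\' just before index i
def pvCountBack (cs : List Char) : Nat → Nat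
  | 0 => 0
  | Nat.succ j => if cs.getD j ' ' = '\\' then pvCountBack cs j + 1 else 0

-- outer loop `for i, char in enumerate(unescaped_string)` of A
def pvLoopA (cs : List Char) : List Char → Nat → List Char → List Char
  | [], _, acc => acc
  | c :: rest, i, acc =>
    if c = '\'' then pvLoopA cs rest (i + 1) (acc ++ ['\'', '\''])
    else if c = '"' then
      pvLoopA cs rest (i + 1) (acc ++ List.replicate (pvCountBack cs i) '\\' ++ ['\\', '"'])
    else pvLoopA cs rest (i + 1) (acc ++ [c])

def form_powershell_command (unescaped_string : String) : String :=
  let cs := unescaped_string.toList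
  let escaped := pvLoopA cs cs 0 []
  "powershell -Command \"" ++ String.mk escaped ++ "\""

-- ===== PORT B =====
-- B's single loop: `run` = length of the backslash run ending at the current position
def pvLoopB : List Char → List Char → Nat → List Char
  | [], acc, _ => acc
  | c :: rest, acc, run =>
    if c = '\'' then pvLoopB rest (acc ++ ['\'', '\'']) 0
    else if c = '"' then pvLoopB rest (acc ++ List.replicate (run + 1) '\\' ++ ['"']) 0
    else if c = '\\' then pvLoopB rest (acc ++ [c]) (run + 1)
    else pvLoopB rest (acc ++ [c]) 0

def form_powershell_command_alt (unescaped_string : String) : String :=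
  let escaped := pvLoopB unescaped_string.toList [] 0
  "powershell -Command \"" ++ String.mk escaped ++ "\""

-- ===== PRECONDITION & SPEC =====
def Spec_form_powershell_command (unescaped_string : String) (out : String) : Prop := out = form_powershell_command_alt unescaped_string
instance (unescaped_string : String) (out : String) : Decidable (Spec_form_powershell_command unescaped_string out) := by unfold Spec_form_powershell_command; infer_instance

-- ===== CLAIM (what is proved, stated in full; the proofs are below) =====
def Claim_equal_form_powershell_command : Prop := ∀ (unescaped_string : String), Dom_form_powershell_command unescaped_string → Spec_form_powershell_command unescaped_string (form_powershell_command unescaped_string)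

-- ===== LEMMAS AND PROOFS =====

theorem replicate_snoc_pair (n : Nat) (d : Char) :
    List.replicate n '\\' ++ ['\\', d] = List.replicate (n + 1) '\\' ++ [d] := by
  have : List.replicate (n + 1) '\\' = List.replicate n '\\' ++ ['\\'] := by
    simp [List.replicate_succ']
  simp [this]

theorem loopA_eq_loopB (rest : List Char) :
    ∀ (cs : List Char) (i : Nat) (acc : List Char),
      cs.drop i = rest →
      pvLoopA cs rest i acc = pvLoopB rest acc (pvCountBack cs i) := by
  induction rest with
  | nil => intro cs i acc _; simp [pvLoopA, pvLoopB]
  | cons c rest ih =>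
    intro cs i acc hdrop
    have hget : cs.getD i ' ' = c := by
      have : cs.getD i ' ' = (cs.drop i).getD 0 ' ' := by
        rcases Nat.lt_or_ge i cs.length with h | h
        · simp [List.getD_eq_getElem?_getD]
        · rw [List.drop_eq_nil_of_le h] at hdrop; simp at hdrop
      rw [hdrop] at this; simpa using this
    have hdrop' : cs.drop (i + 1) = rest := by
      have := congrArg (List.drop 1) hdrop
      simpa [List.drop_drop, Nat.add_comm] using this
    have hcb : pvCountBack cs (i + 1) =
        if cs.getD i ' ' = '\\' then pvCountBack cs i + 1 else 0 := rfl
    by_cases h1 : c = '\''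
    · subst h1
      rw [pvLoopA, pvLoopB]
      rw [ih cs (i + 1) _ hdrop', hcb, hget]
      simp
    · by_cases h2 : c = '"'
      · subst h2
        rw [pvLoopA, pvLoopB]
        simp only [if_neg h1]
        rw [ih cs (i + 1) _ hdrop', hcb, hget]
        simp [replicate_snoc_pair]
      · by_cases h3 : c = '\\'
        · subst h3
          rw [pvLoopA, pvLoopB]
          simp only [if_neg h1, if_neg h2]
          rw [ih cs (i + 1) _ hdrop', hcb, hget]
          simp
        · rw [pvLoopA, pvLoopB]
          simp only [if_neg h1, if_neg h2, if_neg h3]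
          rw [ih cs (i + 1) _ hdrop', hcb, hget]
          simp [h3]

-- ===== VERDICT (by name: the statement is the Claim_ definition above) =====
theorem form_powershell_command_spec : Claim_equal_form_powershell_command := by
  intro s _
  unfold Spec_form_powershell_command form_powershell_command form_powershell_command_alt
  have := loopA_eq_loopB s.toList s.toList 0 [] (by simp)
  simp only [this, pvCountBack]
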